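-- pv_equiv track=rewrite | github.com/KiNG-DREWSKiii/symSAT | src/symSAT/solver.py | generate_symmetry_class
-- ===== SOURCE A (Python) =====
-- import itertools
-- from typing import List, Tuple, Dict, Set
--
-- Assignment = List[int]  # 1 = True, 0 = False
--
-- def generate_symmetry_class(n: int, k: int) -> List[Assignment]:
--     configs = []
--     indices = list(range(n))
--     for majority_value in [1, 0]:
--         minority_value = 1 - majority_value
--         for flip_indices in itertools.combinations(indices, k):
--             assignment = [majority_value] * n
--             for idx in flip_indices:
--                 assignment[idx] = minority_value
--             configs.append(assignment)
--     return configs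
-- ===== SOURCE B (Python) =====
-- from typing import List
--
-- Assignment = List[int]  # 1 = True, 0 = False
--
-- def generate_symmetry_class(n: int, k: int) -> List[Assignment]:
--     N = n if n > 0 else 0
--     def build(majority_value: int, minority_value: int) -> List[Assignment]:
--         if k < 0 or k > N:
--             return []
--         out = []
--         # explicit DFS stack; frame = (m, rem, chain): m positions still to fill,
--         # rem minority values still to place, chain = linked reversed prefix.
--         # The include-branch is pushed last (popped first), so emission order is
--         # lexicographic over the chosen minority positions.
--         stack = [(N, k, None)]
--         while stack:
--             m, rem, chain = stack.pop()
--             if m == 0: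
--                 row = []
--                 while chain is not None:
--                     row.append(chain[0])
--                     chain = chain[1]
--                 row.reverse()
--                 out.append(row)
--                 continue
--             if rem <= m - 1:
--                 stack.append((m - 1, rem, (majority_value, chain)))
--             if rem >= 1:
--                 stack.append((m - 1, rem - 1, (minority_value, chain)))
--         return out
--     return build(1, 0) + build(0, 1)
-- ===== Notes on version B (the rewrite author's own statement) =====
-- stated objective: alternative
-- what changed: Replaced itertools.combinations over materialized index tuples plus fill-and-overwrite of a [majority]*n list by an iterative explicit-stack backtracking over positions with shared linked prefixes, emitting assignments in the same lexicographic order.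
import Mathlib
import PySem

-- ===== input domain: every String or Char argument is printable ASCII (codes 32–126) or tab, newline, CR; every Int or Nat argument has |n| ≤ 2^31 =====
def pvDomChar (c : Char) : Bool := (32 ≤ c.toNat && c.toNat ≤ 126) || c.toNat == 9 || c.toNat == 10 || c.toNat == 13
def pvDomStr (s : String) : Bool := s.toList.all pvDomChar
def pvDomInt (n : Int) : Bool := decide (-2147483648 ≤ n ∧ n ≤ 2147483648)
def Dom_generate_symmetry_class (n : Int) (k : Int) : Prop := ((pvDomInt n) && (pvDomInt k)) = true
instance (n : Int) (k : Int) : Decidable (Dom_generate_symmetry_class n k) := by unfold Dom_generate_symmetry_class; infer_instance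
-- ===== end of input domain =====

-- B replaces the combinations-then-overwrite construction by a direct recursive
-- backtracking over positions (alternative decomposition, same cost).

-- ===== PORT A =====
-- itertools.combinations(l, r) in lexicographic order (exact port of the library call)
def pvCombos : List Int → Nat → List (List Int)
  | _, 0 => [[]]
  | [], _ + 1 => []
  | x :: xs, r + 1 => (pvCombos xs r).map (fun c => x :: c) ++ pvCombos xs (r + 1)

-- assignment = [majority]*n; for idx in flip: assignment[idx] = minority
def pvFill (maj minr : Int) (n : Int) (flip : List Int) : List Int :=
  flip.foldl (fun a idx => a.set idx.toNat minr) (List.replicate n.toNat maj)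

def generate_symmetry_class (n : Int) (k : Int) : List (List Int) :=
  ([1, 0] : List Int).foldl
    (fun configs maj =>
      configs ++ (pvCombos (PySem.List.pyRange 0 n 1) k.toNat).map (pvFill maj (1 - maj) n))
    []

-- ===== PORT B =====
-- the while-loop of Source B: an explicit DFS stack; frame = (m, rem, chain):
-- m positions still to fill, rem minorities still to place, chain = linked reversed prefix
def pvBuildLoop (maj minr : Int) : List (Nat × Int × List Int) → List (List Int) → List (List Int)
  | [], out => out
  | (0, _rem, chain) :: stack, out => pvBuildLoop maj minr stack (out ++ [chain.reverse])
  | (m + 1, rem, chain) :: stack, out =>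
      pvBuildLoop maj minr
        ((if 1 ≤ rem then [(m, rem - 1, minr :: chain)] else []) ++
          (if rem ≤ (m : Int) then [(m, rem, maj :: chain)] else []) ++ stack) out
  termination_by stack _ => (stack.map (fun f => 3 ^ f.1)).sum
  decreasing_by
  · simp
  · have hp : 0 < (3 : Nat) ^ m := by positivity
    split_ifs <;> simp <;> omega

-- build(majority_value, minority_value) of Source B (N ≥ 0 always, kept as a Nat)
def pvBuild (N : Nat) (maj minr k : Int) : List (List Int) :=
  if k < 0 ∨ (N : Int) < k then []
  else pvBuildLoop maj minr [(N, k, ([] : List Int))] []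

def generate_symmetry_class_alt (n : Int) (k : Int) : List (List Int) :=
  pvBuild (if 0 < n then n else 0).toNat 1 0 k ++ pvBuild (if 0 < n then n else 0).toNat 0 1 k

-- ===== PRECONDITION & SPEC =====
-- A raises ValueError when k < 0 (combinations' r must be non-negative); nothing else is excluded.
def Pre_generate_symmetry_class (n : Int) (k : Int) : Prop := 0 ≤ k
instance (n : Int) (k : Int) : Decidable (Pre_generate_symmetry_class n k) := by
  unfold Pre_generate_symmetry_class; infer_instance

def pvWitness_generate_symmetry_class : Int × Int := (3, 1)

def Spec_generate_symmetry_class (n : Int) (k : Int) (out : List (List Int)) : Prop := out = generate_symmetry_class_alt n k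
instance (n : Int) (k : Int) (out : List (List Int)) : Decidable (Spec_generate_symmetry_class n k out) := by unfold Spec_generate_symmetry_class; infer_instance

-- ===== CLAIM (what is proved, stated in full; the proofs are below) =====
def Claim_equal_generate_symmetry_class : Prop := ∀ (n : Int) (k : Int), Dom_generate_symmetry_class n k → Pre_generate_symmetry_class n k → Spec_generate_symmetry_class n k (generate_symmetry_class n k)

-- ===== LEMMAS AND PROOFS =====

-- proof-side recursive characterisation of one pass of the stack machine
def pvAltRec (maj minr : Int) : Nat → Int → List (List Int)
  | 0, rem => if rem = 0 then [[]] else []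
  | m + 1, rem =>
      (if 0 < rem then (pvAltRec maj minr m (rem - 1)).map (fun rest => minr :: rest) else [])
        ++ (pvAltRec maj minr m rem).map (fun rest => maj :: rest)

-- pvAltRec is empty outside 0 ≤ rem ≤ m
theorem pvAltRec_empty (maj minr : Int) :
    ∀ (m : Nat) (rem : Int), (rem < 0 ∨ (m : Int) < rem) → pvAltRec maj minr m rem = [] := by
  intro m
  induction m with
  | zero =>
    intro rem h
    have : rem ≠ 0 := by rcases h with h | h <;> omega
    simp [pvAltRec, this]
  | succ m ih =>
    intro rem h
    simp only [pvAltRec]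
    rcases h with h | h
    · rw [if_neg (by omega), ih rem (Or.inl h)]
      simp
    · have hm : ((m : Nat) : Int) < rem := by push_cast at h ⊢; omega
      rw [ih rem (Or.inr hm), List.map_nil, List.append_nil]
      split_ifs with h0
      · rw [ih (rem - 1) (Or.inr (by push_cast at h ⊢; omega))]
        simp
      · rfl

-- the stack machine computes, frame by frame, the pvAltRec results under the stored prefixes
theorem pvBuildLoop_eq (maj minr : Int) :
    ∀ (stack : List (Nat × Int × List Int)) (out : List (List Int)),
    (∀ f ∈ stack, 0 ≤ f.2.1 ∧ f.2.1 ≤ (f.1 : Int)) →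
    pvBuildLoop maj minr stack out =
      out ++ stack.flatMap (fun f => (pvAltRec maj minr f.1 f.2.1).map (fun t => f.2.2.reverse ++ t)) := by
  intro stack out hwf
  induction stack, out using pvBuildLoop.induct maj minr with
  | case1 out => simp [pvBuildLoop]
  | case2 rem chain stack out ih =>
    have h0 : rem = 0 := by
      have := hwf (0, rem, chain) List.mem_cons_self
      simp at this
      omega
    have hcl : chain.attach.reverse.unattach = chain.reverse := by simp
    rw [hcl] at ih
    rw [pvBuildLoop, ih (fun f hf => hwf f (List.mem_cons_of_mem _ hf))]
    subst h0
    simp [pvAltRec]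
  | case3 m rem chain stack out ih =>
    have hf := hwf (m + 1, rem, chain) List.mem_cons_self
    simp only [dite_eq_ite] at ih
    have hwf' : ∀ f ∈ (((if 1 ≤ rem then [(m, rem - 1, minr :: chain)] else []) ++
        (if rem ≤ (m : Int) then [(m, rem, maj :: chain)] else [])) ++ stack),
        0 ≤ f.2.1 ∧ f.2.1 ≤ (f.1 : Int) := by
      intro f hfmem
      rcases List.mem_append.mp hfmem with hab | hst
      · rcases List.mem_append.mp hab with ha | hb
        · have h1 : 1 ≤ rem := by
            by_contra h1
            rw [if_neg h1] at ha
            simp at ha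
          rw [if_pos h1] at ha
          simp only [List.mem_singleton] at ha
          subst ha
          have hr1 : rem ≤ (m : Int) + 1 := by
            have := hf.2
            push_cast at this
            exact this
          constructor <;> simp <;> omega
        · have h2 : rem ≤ (m : Int) := by
            by_contra h2
            rw [if_neg h2] at hb
            simp at hb
          rw [if_pos h2] at hb
          simp only [List.mem_singleton] at hb
          subst hb
          have hr0 : 0 ≤ rem := hf.1
          constructor <;> simp <;> omega
      · exact hwf f (List.mem_cons_of_mem _ hst)
    rw [pvBuildLoop, ih hwf']
    simp only [List.flatMap_append, List.flatMap_cons, List.append_assoc]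
    congr 1
    rw [← List.append_assoc]
    congr 1
    have hrec : pvAltRec maj minr (m + 1) rem =
        (if 0 < rem then (pvAltRec maj minr m (rem - 1)).map (fun rest => minr :: rest) else [])
          ++ (pvAltRec maj minr m rem).map (fun rest => maj :: rest) := rfl
    rw [hrec, List.map_append]
    congr 1
    · by_cases h1 : 1 ≤ rem
      · rw [if_pos h1, if_pos (by omega)]
        simp [List.map_map, Function.comp_def]
      · rw [if_neg h1, if_neg (by omega)]
        rfl
    · by_cases h2 : rem ≤ (m : Int)
      · rw [if_pos h2]
        simp [List.map_map, Function.comp_def]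
      · rw [if_neg h2, pvAltRec_empty maj minr m rem (Or.inr (by omega))]
        simp

-- one call of build(maj, minr) equals the recursion
theorem pvBuild_eq (N : Nat) (maj minr k : Int) (hk : 0 ≤ k) :
    pvBuild N maj minr k = pvAltRec maj minr N k := by
  unfold pvBuild
  split_ifs with h
  · rcases h with h | h
    · omega
    · exact (pvAltRec_empty maj minr N k (Or.inr h)).symm
  · rw [pvBuildLoop_eq maj minr [(N, k, ([] : List Int))] []
      (by
        rcases not_or.mp h with ⟨h1, h2⟩
        intro f hf
        simp only [List.mem_singleton] at hf
        subst hf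
        exact ⟨hk, not_lt.mp h2⟩)]
    simp

-- the Int-valued range [s, s+m) used throughout the proofs
def pvIR (s m : Nat) : List Int := (List.range' s m).map (fun j : Nat => (j : Int))

theorem pvIR_succ (s m : Nat) : pvIR s (m + 1) = (s : Int) :: pvIR (s + 1) m := by
  simp [pvIR, List.range'_succ]

theorem pvIR_nonneg (s m : Nat) : ∀ x ∈ pvIR s m, 0 ≤ x ∧ (s : Int) ≤ x := by
  intro x hx
  unfold pvIR at hx
  rcases List.mem_map.mp hx with ⟨j, hj, rfl⟩
  have := (List.mem_range'_1.mp hj).1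
  constructor <;> [positivity; exact_mod_cast this]

theorem pvIR_getElem? (s m p : Nat) :
    (pvIR s m)[p]? = if p < m then some ((s + p : Nat) : Int) else none := by
  by_cases hp : p < m
  · rw [if_pos hp, pvIR, List.getElem?_map,
      List.getElem?_eq_getElem (by simpa using hp)]
    simp [List.getElem_range']
  · rw [if_neg hp, pvIR, List.getElem?_map,
      List.getElem?_eq_none (by simpa using Nat.le_of_not_lt hp)]
    rfl

-- every member of a combination is a member of the pool
theorem pvCombos_mem_subset : ∀ (l : List Int) (r : Nat) (c : List Int),
    c ∈ pvCombos l r → ∀ x ∈ c, x ∈ l := by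
  intro l
  induction l with
  | nil =>
    intro r c hc x hx
    cases r with
    | zero => simp [pvCombos] at hc; simp [hc] at hx
    | succ r => simp [pvCombos] at hc
  | cons y ys ih =>
    intro r c hc x hx
    cases r with
    | zero => simp [pvCombos] at hc; simp [hc] at hx
    | succ r =>
      simp only [pvCombos, List.mem_append, List.mem_map] at hc
      rcases hc with ⟨c', hc', rfl⟩ | hc
      · rcases List.mem_cons.mp hx with rfl | hx
        · exact List.mem_cons_self
        · exact List.mem_cons_of_mem _ (ih r c' hc' x hx)
      · exact List.mem_cons_of_mem _ (ih (r + 1) c hc x hx)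

-- the value at position p after the fill loop of A
theorem pvFoldl_set_getElem? (minr : Int) :
    ∀ (flip : List Int) (xs : List Int) (p : Nat),
    (flip.foldl (fun a idx => a.set idx.toNat minr) xs)[p]? =
      if (∃ i ∈ flip, i.toNat = p) then (if p < xs.length then some minr else none) else xs[p]? := by
  intro flip
  induction flip with
  | nil => intro xs p; simp
  | cons i rest ih =>
    intro xs p
    simp only [List.foldl_cons]
    rw [ih, List.length_set]
    by_cases hrest : ∃ j ∈ rest, j.toNat = p
    · have hall : ∃ j ∈ i :: rest, j.toNat = p := by
        rcases hrest with ⟨j, hj, hjp⟩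
        exact ⟨j, List.mem_cons_of_mem _ hj, hjp⟩
      rw [if_pos hrest, if_pos hall]
    · by_cases hi : i.toNat = p
      · have hall : ∃ j ∈ i :: rest, j.toNat = p := ⟨i, List.mem_cons_self, hi⟩
        rw [if_neg hrest, if_pos hall, List.getElem?_set, if_pos hi, hi]
      · have hall : ¬ ∃ j ∈ i :: rest, j.toNat = p := by
          rintro ⟨j, hj, hjp⟩
          rcases List.mem_cons.mp hj with rfl | hj'
          · exact hi hjp
          · exact hrest ⟨j, hj', hjp⟩
        rw [if_neg hrest, if_neg hall, List.getElem?_set_ne hi]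

-- the backtracking recursion of B produces exactly the masks of the combinations of [s, s+m)
theorem pvAltRec_eq_mask (maj minr : Int) : ∀ (m r s : Nat),
    pvAltRec maj minr m (r : Int) =
      (pvCombos (pvIR s m) r).map
        (fun flip => (pvIR s m).map (fun j => if j ∈ flip then minr else maj)) := by
  intro m
  induction m with
  | zero =>
    intro r s
    cases r with
    | zero => simp [pvAltRec, pvCombos, pvIR]
    | succ r =>
      have h : ((r : Int)) + 1 ≠ 0 := by omega
      simp [pvAltRec, pvCombos, pvIR, h]
  | succ m ih =>
    intro r s
    rw [pvIR_succ]
    cases r with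
    | zero =>
      have h0 := ih 0 (s + 1)
      rw [Nat.cast_zero] at h0
      simp only [Nat.cast_zero, pvAltRec, pvCombos]
      rw [if_neg (by norm_num), List.nil_append, h0]
      simp [pvCombos]
    | succ r =>
      have hcast : ((r + 1 : Nat) : Int) = (r : Int) + 1 := by push_cast; ring
      have h1 : ((r : Int) + 1) - 1 = (r : Int) := by ring
      have h2 := ih (r + 1) (s + 1)
      push_cast at h2
      simp only [pvAltRec, pvCombos, hcast]
      rw [if_pos (by positivity), h1, ih r (s + 1), h2]
      simp only [List.map_append, List.map_map]
      congr 1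
      · -- branch where position s is chosen
        apply List.map_congr_left
        intro flip hflip
        have hsub := pvCombos_mem_subset _ _ _ hflip
        simp only [Function.comp_apply, List.map_cons]
        congr 1
        · simp
        · apply List.map_congr_left
          intro j hj
          have hjs : (s : Int) + 1 ≤ j := by
            have := (pvIR_nonneg (s + 1) m j hj).2; push_cast at this; linarith
          have hne : j ≠ (s : Int) := by intro h; rw [h] at hjs; linarith
          simp [hne]
      · -- branch where position s is not chosen
        apply List.map_congr_left
        intro flip hflip
        have hsub := pvCombos_mem_subset _ _ _ hflip
        have hs : ((s : Int)) ∉ flip := by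
          intro h
          have := (pvIR_nonneg (s + 1) m _ (hsub _ h)).2
          push_cast at this; linarith
        simp only [Function.comp_apply, List.map_cons]
        rw [if_neg hs]

-- the A-side fill-and-overwrite equals the mask, for combinations drawn from range(n)
theorem pvFill_eq_mask (maj minr : Int) (n : Int) (r : Nat) (flip : List Int)
    (hflip : flip ∈ pvCombos (pvIR 0 n.toNat) r) :
    pvFill maj minr n flip = (pvIR 0 n.toNat).map (fun j => if j ∈ flip then minr else maj) := by
  have hsub := pvCombos_mem_subset _ _ _ hflip
  apply List.ext_getElem?
  intro p
  rw [pvFill, pvFoldl_set_getElem? minr flip (List.replicate n.toNat maj) p,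
    List.getElem?_map, pvIR_getElem? 0 n.toNat p, List.length_replicate]
  by_cases hp : p < n.toNat
  · rw [if_pos hp]
    have hiff : (∃ i ∈ flip, i.toNat = p) ↔ ((p : Int) ∈ flip) := by
      constructor
      · rintro ⟨i, hi, rfl⟩
        have hnn := (pvIR_nonneg 0 n.toNat i (hsub i hi)).1
        rwa [Int.toNat_of_nonneg hnn]
      · intro h
        exact ⟨(p : Int), h, by simp⟩
    by_cases hmem : (p : Int) ∈ flip
    · rw [if_pos (hiff.mpr hmem), if_pos hp]
      simp [hmem]
    · rw [if_neg (fun h => hmem (hiff.mp h)), List.getElem?_replicate, if_pos hp]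
      simp [hp, hmem]
  · rw [if_neg hp]
    split_ifs with h
    · rfl
    · exact List.getElem?_eq_none (by simpa using Nat.le_of_not_lt hp)

theorem pvRange_cast (n : Int) : PySem.List.pyRange 0 n 1 = pvIR 0 n.toNat := by
  rw [PySem.List.pyRange_one, pvIR, List.range_eq_range']
  rw [show (n - 0).toNat = n.toNat by simp]
  exact List.map_congr_left (fun x _ => by ring)

-- one majority pass of A equals one pvAltRec pass of B
theorem pass_eq (maj minr : Int) (n : Int) (r : Nat) :
    (pvCombos (PySem.List.pyRange 0 n 1) r).map (pvFill maj minr n) =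
      pvAltRec maj minr n.toNat (r : Int) := by
  rw [pvRange_cast, pvAltRec_eq_mask maj minr n.toNat r 0]
  exact List.map_congr_left fun flip hflip => pvFill_eq_mask maj minr n r flip hflip

-- ===== VERDICT (by name: the statement is the Claim_ definition above) =====
theorem generate_symmetry_class_spec : Claim_equal_generate_symmetry_class := by
  intro n k _ hk
  unfold Spec_generate_symmetry_class generate_symmetry_class generate_symmetry_class_alt
  simp only [List.foldl_cons, List.foldl_nil, List.nil_append]
  have hk' : ((k.toNat : Int)) = k := Int.toNat_of_nonneg hk
  have hN : (if 0 < n then n else 0).toNat = n.toNat := by split <;> omega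
  rw [hN, pvBuild_eq n.toNat 1 0 k hk, pvBuild_eq n.toNat 0 1 k hk,
    show (1 : Int) - 1 = 0 by ring, show (1 : Int) - 0 = 1 by ring,
    pass_eq 1 0 n k.toNat, pass_eq 0 1 n k.toNat, hk']
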